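-- pv_equiv track=rewrite | github.com/kenkun091/seismic-chatbot | core/chatbot.py | _determine_tool_from_params
-- ===== SOURCE A (Python) =====
-- from typing import Dict, Any, Optional, List
--
-- def _determine_tool_from_params(params: Dict[str, Any], user_input: str) -> str:
--     """
--     Determine the appropriate tool based on parameters and user input.
--
--     Args:
--         params: Extracted parameters
--         user_input: Original user input
--
--     Returns:
--         str: Tool name
--     """
--     text = user_input.lower()
--
--     # Check for explicit tool mentions
--     if any(word in text for word in ['ricker', 'wavelet']):
--         if any(word in text for word in ['plot', 'show', 'display', 'visualize']):
--             return 'plot_ricker'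
--         else:
--             return 'make_ricker'
--
--     # Enhanced logic for wedge model plotting
--     if any(word in text for word in ['wedge', 'model', 'tuning']):
--         if any(word in text for word in ['plot', 'show', 'display', 'visualize']):
--             return 'plot_wedge_model'
--         else:
--             return 'wedge_model'
--
--     if any(word in text for word in ['avo', 'reflectivity', 'zoeppritz']):
--         return 'zoeppritz_reflectivity'
--
--     if any(word in text for word in ['shuey', 'approximation']):
--         return 'shuey_reflectivity'
--
--     if any(word in text for word in ['fluid', 'indicator']):
--         return 'avo_fluid_indicator'
--
--     # Infer from parameters
--     if 'frequency' in params and 'max_thickness' not in params: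
--         return 'make_ricker'
--     elif 'max_thickness' in params:
--         return 'wedge_model'
--     elif 'vp1' in params and 'vp2' in params:
--         return 'zoeppritz_reflectivity'
--     elif 'intercept' in params and 'gradient' in params:
--         return 'avo_fluid_indicator'
--
--     return None
-- ===== SOURCE B (Python) =====
-- # Aggregation strategy: every keyword carries a priority; the chosen rule is the
-- # MINIMUM priority among all keywords found in the text, instead of an ordered
-- # scan of if-branches.  The parameter stage is reordered so that the
-- # 'max_thickness' check comes first, removing A's forbidden-key clause.
--
-- _KW_PRIORITY = {
--     'ricker': 0, 'wavelet': 0,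
--     'wedge': 1, 'model': 1, 'tuning': 1,
--     'avo': 2, 'reflectivity': 2, 'zoeppritz': 2,
--     'shuey': 3, 'approximation': 3,
--     'fluid': 4, 'indicator': 4,
-- }
--
-- _BASE_TOOLS = ['make_ricker', 'wedge_model', 'zoeppritz_reflectivity',
--                'shuey_reflectivity', 'avo_fluid_indicator']
-- _PLOT_TOOLS = ['plot_ricker', 'plot_wedge_model']
--
--
-- def _determine_tool_from_params(params, user_input):
--     text = user_input.lower()
--     hits = [p for kw, p in _KW_PRIORITY.items() if kw in text]
--     if hits:
--         best = min(hits)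
--         if best < 2 and any(w in text for w in ('plot', 'show', 'display', 'visualize')):
--             return _PLOT_TOOLS[best]
--         return _BASE_TOOLS[best]
--     if 'max_thickness' in params:
--         return 'wedge_model'
--     if 'frequency' in params:
--         return 'make_ricker'
--     if 'vp1' in params and 'vp2' in params:
--         return 'zoeppritz_reflectivity'
--     if 'intercept' in params and 'gradient' in params:
--         return 'avo_fluid_indicator'
--     return None
-- ===== Notes on version B (the rewrite author's own statement) =====
-- stated objective: alternative
-- what changed: Replaces A's ordered if/elif keyword scan by an aggregation: every keyword carries a numeric priority and the chosen rule is the minimum priority among keywords found in the text (with plot variants for priorities 0-1), and the parameter stage is reordered with the max_thickness check first so the forbidden-key clause disappears.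
import Mathlib
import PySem

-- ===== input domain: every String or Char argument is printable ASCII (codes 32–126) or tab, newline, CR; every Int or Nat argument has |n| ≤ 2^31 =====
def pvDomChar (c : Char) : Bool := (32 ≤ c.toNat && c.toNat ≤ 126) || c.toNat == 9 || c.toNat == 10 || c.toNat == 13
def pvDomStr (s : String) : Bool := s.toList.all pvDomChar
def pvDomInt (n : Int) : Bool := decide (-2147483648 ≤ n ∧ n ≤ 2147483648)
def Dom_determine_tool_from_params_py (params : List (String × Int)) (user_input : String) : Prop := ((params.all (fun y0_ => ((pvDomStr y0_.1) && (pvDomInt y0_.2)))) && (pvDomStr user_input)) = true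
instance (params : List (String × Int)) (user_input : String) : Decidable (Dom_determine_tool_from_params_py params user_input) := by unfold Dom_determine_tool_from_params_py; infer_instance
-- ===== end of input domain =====

-- B picks the tool by aggregation: each keyword carries a priority and the winner is the minimum
-- priority among keywords found in the text, instead of A's ordered if/elif scan (alternative, same cost).

-- ===== PORT A =====
def determine_tool_from_params_py (params : List (String × Int)) (user_input : String) : Option String :=
  let text := PySem.Str.lower user_input
  if ["ricker", "wavelet"].any (fun w => PySem.Str.isIn w text) then
    (if ["plot", "show", "display", "visualize"].any (fun w => PySem.Str.isIn w text) then
      some "plot_ricker"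
    else
      some "make_ricker")
  else if ["wedge", "model", "tuning"].any (fun w => PySem.Str.isIn w text) then
    (if ["plot", "show", "display", "visualize"].any (fun w => PySem.Str.isIn w text) then
      some "plot_wedge_model"
    else
      some "wedge_model")
  else if ["avo", "reflectivity", "zoeppritz"].any (fun w => PySem.Str.isIn w text) then
    some "zoeppritz_reflectivity"
  else if ["shuey", "approximation"].any (fun w => PySem.Str.isIn w text) then
    some "shuey_reflectivity"
  else if ["fluid", "indicator"].any (fun w => PySem.Str.isIn w text) then
    some "avo_fluid_indicator"
  else if (PySem.Dict.mk params).contains "frequency" && !((PySem.Dict.mk params).contains "max_thickness") then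
    some "make_ricker"
  else if (PySem.Dict.mk params).contains "max_thickness" then
    some "wedge_model"
  else if (PySem.Dict.mk params).contains "vp1" && (PySem.Dict.mk params).contains "vp2" then
    some "zoeppritz_reflectivity"
  else if (PySem.Dict.mk params).contains "intercept" && (PySem.Dict.mk params).contains "gradient" then
    some "avo_fluid_indicator"
  else
    none

-- ===== PORT B =====
def pvKwPriority : List (String × Nat) :=
  [("ricker", 0), ("wavelet", 0),
   ("wedge", 1), ("model", 1), ("tuning", 1),
   ("avo", 2), ("reflectivity", 2), ("zoeppritz", 2),
   ("shuey", 3), ("approximation", 3),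
   ("fluid", 4), ("indicator", 4)]

def pvBaseTools : List String :=
  ["make_ricker", "wedge_model", "zoeppritz_reflectivity",
   "shuey_reflectivity", "avo_fluid_indicator"]

def pvPlotTools : List String := ["plot_ricker", "plot_wedge_model"]

def determine_tool_from_params_py_alt (params : List (String × Int)) (user_input : String) : Option String :=
  let text := PySem.Str.lower user_input
  let hits : List Nat := pvKwPriority.filterMap (fun kp => if PySem.Str.isIn kp.1 text then some kp.2 else none)
  match PySem.List.min? hits (fun p => p) with
  | some best =>
    if best < 2 && ["plot", "show", "display", "visualize"].any (fun w => PySem.Str.isIn w text) then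
      PySem.List.pyGet? pvPlotTools (best : Int)
    else
      PySem.List.pyGet? pvBaseTools (best : Int)
  | none =>
    if (PySem.Dict.mk params).contains "max_thickness" then some "wedge_model"
    else if (PySem.Dict.mk params).contains "frequency" then some "make_ricker"
    else if (PySem.Dict.mk params).contains "vp1" && (PySem.Dict.mk params).contains "vp2" then some "zoeppritz_reflectivity"
    else if (PySem.Dict.mk params).contains "intercept" && (PySem.Dict.mk params).contains "gradient" then some "avo_fluid_indicator"
    else none

-- ===== PRECONDITION & SPEC =====
def Spec_determine_tool_from_params_py (params : List (String × Int)) (user_input : String) (out : Option String) : Prop := out = determine_tool_from_params_py_alt params user_input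
instance (params : List (String × Int)) (user_input : String) (out : Option String) : Decidable (Spec_determine_tool_from_params_py params user_input out) := by unfold Spec_determine_tool_from_params_py; infer_instance

-- ===== CLAIM (what is proved, stated in full; the proofs are below) =====
def Claim_equal_determine_tool_from_params_py : Prop := ∀ (params : List (String × Int)) (user_input : String), Dom_determine_tool_from_params_py params user_input → Spec_determine_tool_from_params_py params user_input (determine_tool_from_params_py params user_input)

-- ===== LEMMAS AND PROOFS =====

-- min-priority of the hit list, characterised by which keyword group is present
theorem pvMinHits (b1 b2 b3 b4 b5 b6 b7 b8 b9 b10 b11 b12 : Bool) :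
    PySem.List.min?
      ((if b1 then [(0:Nat)] else []) ++ ((if b2 then [0] else []) ++
       ((if b3 then [1] else []) ++ ((if b4 then [1] else []) ++
       ((if b5 then [1] else []) ++ ((if b6 then [2] else []) ++
       ((if b7 then [2] else []) ++ ((if b8 then [2] else []) ++
       ((if b9 then [3] else []) ++ ((if b10 then [3] else []) ++
       ((if b11 then [4] else []) ++ (if b12 then [4] else []))))))))))))
      (fun p => p)
    = if b1 || b2 then some 0
      else if b3 || b4 || b5 then some 1
      else if b6 || b7 || b8 then some 2
      else if b9 || b10 then some 3
      else if b11 || b12 then some 4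
      else none := by
  revert b1 b2 b3 b4 b5 b6 b7 b8 b9 b10 b11 b12; decide

-- ===== VERDICT (by name: the statement is the Claim_ definition above) =====
set_option maxHeartbeats 2000000 in
theorem determine_tool_from_params_py_spec : Claim_equal_determine_tool_from_params_py := by
  intro params user_input _
  unfold Spec_determine_tool_from_params_py determine_tool_from_params_py determine_tool_from_params_py_alt
  simp only [pvKwPriority, List.filterMap_eq_flatMap_toList, List.flatMap_cons, List.flatMap_nil,
    apply_ite Option.toList, Option.toList_some, Option.toList_none, List.append_nil,
    List.any_cons, List.any_nil, Bool.or_false]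
  rw [pvMinHits]
  split_ifs <;> simp_all [pvPlotTools, pvBaseTools, PySem.List.pyGet?, PySem.List.pyIdx?]
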